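-- pv_equiv track=rewrite | github.com/cylc/cylc-flow | lib/cylc/state_summary.py | extract_group_state
-- ===== SOURCE A (Python) =====
-- def extract_group_state( child_states, is_stopped=False ):
--     """Summarise child states as a group."""
--     ordered_states = ['submit-failed', 'failed', 'submit-retrying', 'retrying', 'running',
--             'submitted', 'ready', 'queued', 'waiting', 'held', 'succeeded', 'runahead']
--     if is_stopped:
--         ordered_states = ['submit-failed', 'failed', 'running', 'submitted',
--             'ready', 'submit-retrying', 'retrying', 'succeeded', 'queued', 'waiting',
--             'held', 'runahead']
--     for state in ordered_states:
--         if state in child_states: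
--             return state
--     return None
-- ===== SOURCE B (Python) =====
-- _NORMAL = ['submit-failed', 'failed', 'submit-retrying', 'retrying', 'running',
--            'submitted', 'ready', 'queued', 'waiting', 'held', 'succeeded', 'runahead']
-- _STOPPED = ['submit-failed', 'failed', 'running', 'submitted', 'ready',
--             'submit-retrying', 'retrying', 'succeeded', 'queued', 'waiting',
--             'held', 'runahead']
-- _NORMAL_RANK = {s: i for i, s in enumerate(_NORMAL)}
-- _STOPPED_RANK = {s: i for i, s in enumerate(_STOPPED)}
--
-- def extract_group_state(child_states, is_stopped=False):
--     """Summarise child states as a group (single pass over child_states)."""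
--     rank = _STOPPED_RANK if is_stopped else _NORMAL_RANK
--     best = None
--     for state in child_states:
--         r = rank.get(state)
--         if r is not None and (best is None or r < best[0]):
--             best = (r, state)
--     return None if best is None else best[1]
-- ===== Notes on version B (the rewrite author's own statement) =====
-- stated objective: faster
-- what changed: A scans the 12 priority-ordered state names, each doing a membership scan of child_states; B precomputes a state->priority dict once and makes a single pass over child_states keeping the element with the smallest rank.
import Mathlib
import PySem

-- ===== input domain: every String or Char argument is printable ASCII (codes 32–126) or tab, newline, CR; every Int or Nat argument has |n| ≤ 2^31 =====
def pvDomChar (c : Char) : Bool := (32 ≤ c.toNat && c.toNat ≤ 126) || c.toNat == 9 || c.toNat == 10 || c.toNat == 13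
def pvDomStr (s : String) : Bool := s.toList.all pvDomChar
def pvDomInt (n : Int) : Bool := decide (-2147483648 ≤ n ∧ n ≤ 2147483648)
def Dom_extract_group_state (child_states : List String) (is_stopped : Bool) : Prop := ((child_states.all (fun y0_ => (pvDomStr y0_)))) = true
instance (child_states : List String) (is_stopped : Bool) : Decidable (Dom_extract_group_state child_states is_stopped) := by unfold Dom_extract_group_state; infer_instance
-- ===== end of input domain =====

-- B replaces A's priority-ordered scan over the 12 state names (each doing a membership
-- scan of child_states) by a precomputed state→priority dict and ONE pass over
-- child_states keeping the element of smallest rank.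

-- B replaces A's priority-ordered scan over the 12 state names (each doing a
-- membership scan of child_states) by a precomputed state->rank dict and ONE pass
-- over child_states keeping the element of smallest rank.

-- ===== PORT A =====
-- for state in ordered_states: if state in child_states: return state / return None
def pvFirstIn : List String → List String → Option String
  | [], _ => none
  | s :: rest, cs => if cs.contains s then some s else pvFirstIn rest cs

def extract_group_state (child_states : List String) (is_stopped : Bool) : Option String :=
  let ordered_states :=
    if is_stopped then
      ["submit-failed", "failed", "running", "submitted", "ready", "submit-retrying",
       "retrying", "succeeded", "queued", "waiting", "held", "runahead"]
    else
      ["submit-failed", "failed", "submit-retrying", "retrying", "running",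
       "submitted", "ready", "queued", "waiting", "held", "succeeded", "runahead"]
  pvFirstIn ordered_states child_states

-- ===== PORT B =====
def pvNormal : List String :=
  ["submit-failed", "failed", "submit-retrying", "retrying", "running",
   "submitted", "ready", "queued", "waiting", "held", "succeeded", "runahead"]

def pvStopped : List String :=
  ["submit-failed", "failed", "running", "submitted", "ready", "submit-retrying",
   "retrying", "succeeded", "queued", "waiting", "held", "runahead"]

-- {s: i for i, s in enumerate(...)}
def pvNormalRank : PySem.Dict String Int :=
  PySem.Dict.ofList ((PySem.List.enumerate pvNormal).map (fun p => (p.2, p.1)))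

def pvStoppedRank : PySem.Dict String Int :=
  PySem.Dict.ofList ((PySem.List.enumerate pvStopped).map (fun p => (p.2, p.1)))

def extract_group_state_alt (child_states : List String) (is_stopped : Bool) : Option String :=
  let rank := if is_stopped then pvStoppedRank else pvNormalRank
  let best := child_states.foldl (fun best state =>
    match rank.get? state with
    | none => best
    | some r =>
      match best with
      | none => some (r, state)
      | some p => if r < p.1 then some (r, state) else some p) none
  match best with
  | none => none
  | some b => some b.2

-- ===== PRECONDITION & SPEC =====
def Spec_extract_group_state (child_states : List String) (is_stopped : Bool) (out : Option String) : Prop := out = extract_group_state_alt child_states is_stopped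
instance (child_states : List String) (is_stopped : Bool) (out : Option String) : Decidable (Spec_extract_group_state child_states is_stopped out) := by unfold Spec_extract_group_state; infer_instance

-- ===== CLAIM (what is proved, stated in full; the proofs are below) =====
def Claim_equal_extract_group_state : Prop := ∀ (child_states : List String) (is_stopped : Bool), Dom_extract_group_state child_states is_stopped → Spec_extract_group_state child_states is_stopped (extract_group_state child_states is_stopped)

-- ===== LEMMAS AND PROOFS =====

def rankAux : List String → Int → String → Option Int
  | [], _, _ => none
  | s :: rest, i, x => if s == x then some i else rankAux rest (i + 1) x

def minPair : Option (Int × String) → Option (Int × String) → Option (Int × String)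
  | none, q => q
  | some p, none => some p
  | some p, some q => if q.1 < p.1 then some q else some p

def rpAux (os : List String) (i : Int) (cs : List String) : Option (Int × String) :=
  (pvFirstIn os cs).bind (fun s => (rankAux os i s).map (fun k => (k, s)))

theorem rankAux_ge {os : List String} {i k : Int} {x : String}
    (h : rankAux os i x = some k) : i ≤ k := by
  induction os generalizing i with
  | nil => simp [rankAux] at h
  | cons s rest ih =>
    simp only [rankAux] at h
    split at h
    · simp at h; omega
    · have := ih h; omega

theorem pvFirstIn_mem {os cs : List String} {y : String}
    (h : pvFirstIn os cs = some y) : y ∈ cs := by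
  induction os with
  | nil => simp [pvFirstIn] at h
  | cons s rest ih =>
    simp only [pvFirstIn] at h
    split at h
    · cases h
      rename_i hc
      exact List.contains_iff_mem.mp hc
    · exact ih h

theorem minPair_assoc (a b c : Option (Int × String)) :
    minPair (minPair a b) c = minPair a (minPair b c) := by
  rcases a with _ | p <;> rcases b with _ | q <;> rcases c with _ | r <;>
    simp only [minPair] <;> try rfl
  · by_cases h1 : q.1 < p.1 <;> simp only [h1, if_true, if_false]
  · by_cases h1 : q.1 < p.1 <;> by_cases h2 : r.1 < q.1 <;> by_cases h3 : r.1 < p.1 <;>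
      simp only [h1, h2, h3, if_true, if_false] <;> first | rfl | omega


theorem pvFirstIn_pos {s : String} (rest cs : List String) (h : s ∈ cs) :
    pvFirstIn (s :: rest) cs = some s := by
  show (if cs.contains s then some s else pvFirstIn rest cs) = some s
  simp [h]

theorem pvFirstIn_neg {s : String} (rest cs : List String) (h : s ∉ cs) :
    pvFirstIn (s :: rest) cs = pvFirstIn rest cs := by
  show (if cs.contains s then some s else pvFirstIn rest cs) = pvFirstIn rest cs
  simp [h]

theorem rankAux_head {s : String} (rest : List String) (i : Int) :
    rankAux (s :: rest) i s = some i := by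
  show (if s == s then some i else rankAux rest (i + 1) s) = some i
  simp

theorem rankAux_tail {s x : String} (rest : List String) (i : Int) (h : s ≠ x) :
    rankAux (s :: rest) i x = rankAux rest (i + 1) x := by
  show (if s == x then some i else rankAux rest (i + 1) x) = rankAux rest (i + 1) x
  simp [h]

theorem rpAux_cons (os : List String) (i : Int) (x : String) (cs : List String) :
    rpAux os i (x :: cs) = minPair ((rankAux os i x).map (fun k => (k, x))) (rpAux os i cs) := by
  induction os generalizing i with
  | nil => simp [rpAux, pvFirstIn, rankAux, minPair]
  | cons s rest ih =>
    by_cases hsx : s = x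
    · subst hsx
      rw [show rpAux (s :: rest) i (s :: cs) = some (i, s) by
            simp [rpAux, pvFirstIn_pos rest (s :: cs) (List.mem_cons_self), rankAux_head],
          rankAux_head]
      rcases hq : rpAux (s :: rest) i cs with _ | q
      · simp [minPair]
      · have hq1 : i ≤ q.1 := by
          unfold rpAux at hq
          rcases hf : pvFirstIn (s :: rest) cs with _ | y <;> simp [hf] at hq
          rcases hr : rankAux (s :: rest) i y with _ | k <;> simp [hr] at hq
          have h2 := congrArg Prod.fst hq
          simp at h2
          have := rankAux_ge hr
          omega
        simp only [Option.map_some, minPair]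
        rw [if_neg (by omega)]
    · by_cases hcs : s ∈ cs
      · rw [show rpAux (s :: rest) i (x :: cs) = some (i, s) by
              simp [rpAux, pvFirstIn_pos rest (x :: cs) (List.mem_cons_of_mem x hcs), rankAux_head],
            show rpAux (s :: rest) i cs = some (i, s) by
              simp [rpAux, pvFirstIn_pos rest cs hcs, rankAux_head],
            rankAux_tail rest i hsx]
        rcases hr : rankAux rest (i + 1) x with _ | k
        · simp [minPair]
        · have := rankAux_ge hr
          simp only [Option.map_some, minPair]
          rw [if_pos (by omega)]
      · have hsxcs : s ∉ x :: cs := by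
          intro h
          rcases List.mem_cons.mp h with h | h
          · exact hsx h
          · exact hcs h
        have head_skip : ∀ ds, s ∉ ds →
            rpAux (s :: rest) i ds = rpAux rest (i + 1) ds := by
          intro ds hds
          unfold rpAux
          rw [pvFirstIn_neg rest ds hds]
          rcases hf : pvFirstIn rest ds with _ | y
          · simp
          · have hy : y ∈ ds := pvFirstIn_mem hf
            have hys : s ≠ y := fun h => hds (h ▸ hy)
            simp [rankAux_tail rest i hys]
        rw [head_skip _ hsxcs, head_skip _ hcs, ih, rankAux_tail rest i hsx]

theorem rpAux_map_snd (os : List String) (i : Int) (cs : List String) :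
    (rpAux os i cs).map (·.2) = pvFirstIn os cs := by
  induction os generalizing i with
  | nil => simp [rpAux, pvFirstIn]
  | cons s rest ih =>
    by_cases hc : s ∈ cs
    · simp [rpAux, pvFirstIn_pos rest cs hc, rankAux_head]
    · unfold rpAux
      rw [pvFirstIn_neg rest cs hc]
      rcases hf2 : pvFirstIn rest cs with _ | y
      · simp
      · have hy : y ∈ cs := pvFirstIn_mem hf2
        have hys : s ≠ y := fun h => hc (h ▸ hy)
        have := ih (i + 1)
        unfold rpAux at this
        rw [hf2] at this
        simp only [Option.bind_some, rankAux_tail rest i hys]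
        simpa using this
theorem get_normal (x : String) : pvNormalRank.get? x = rankAux pvNormal 0 x := by
  have h : pvNormalRank = PySem.Dict.mk
      [("submit-failed", 0), ("failed", 1), ("submit-retrying", 2), ("retrying", 3),
       ("running", 4), ("submitted", 5), ("ready", 6), ("queued", 7), ("waiting", 8),
       ("held", 9), ("succeeded", 10), ("runahead", 11)] := by decide
  rw [h]
  simp only [PySem.Dict.get?_mk_cons, pvNormal, rankAux]
  norm_num [PySem.Dict.get?]

theorem pvFirstIn_nil (os : List String) : pvFirstIn os [] = none := by
  induction os with
  | nil => rfl
  | cons s rest ih => simpa [pvFirstIn_neg rest [] (List.not_mem_nil)] using ih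

theorem fold_eq_minPair (rk : String → Option Int) (os : List String) (i : Int)
    (hrk : ∀ x, rk x = rankAux os i x) (cs : List String) (b : Option (Int × String)) :
    cs.foldl (fun best state =>
      match rk state with
      | none => best
      | some r =>
        match best with
        | none => some (r, state)
        | some p => if r < p.1 then some (r, state) else some p) b
    = minPair b (rpAux os i cs) := by
  induction cs generalizing b with
  | nil =>
    have : rpAux os i [] = none := by
      unfold rpAux
      simp [pvFirstIn_nil]
    cases b <;> simp [this, minPair]
  | cons x cs ih =>
    rw [List.foldl_cons, ih, rpAux_cons, ← minPair_assoc]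
    congr 1
    rw [hrk x]
    rcases rankAux os i x with _ | r
    · cases b <;> simp [minPair]
    · cases b <;> simp [minPair]

theorem get_stopped (x : String) : pvStoppedRank.get? x = rankAux pvStopped 0 x := by
  have h : pvStoppedRank = PySem.Dict.mk
      [("submit-failed", 0), ("failed", 1), ("running", 2), ("submitted", 3),
       ("ready", 4), ("submit-retrying", 5), ("retrying", 6), ("succeeded", 7),
       ("queued", 8), ("waiting", 9), ("held", 10), ("runahead", 11)] := by decide
  rw [h]
  simp only [PySem.Dict.get?_mk_cons, pvStopped, rankAux]
  norm_num [PySem.Dict.get?]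

-- ===== VERDICT (by name: the statement is the Claim_ definition above) =====
theorem extract_group_state_spec : Claim_equal_extract_group_state := by
  intro cs st _
  unfold Spec_extract_group_state extract_group_state extract_group_state_alt
  cases st
  · simp only [Bool.false_eq_true, if_false]
    rw [fold_eq_minPair (pvNormalRank.get?) pvNormal 0 get_normal cs none]
    have h := rpAux_map_snd pvNormal 0 cs
    show pvFirstIn pvNormal cs =
      (match minPair none (rpAux pvNormal 0 cs) with
       | none => none
       | some b => some b.2)
    rcases hp : rpAux pvNormal 0 cs with _ | p <;> rw [hp] at h <;>
      simpa [minPair] using h.symm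
  · simp only [if_true]
    rw [fold_eq_minPair (pvStoppedRank.get?) pvStopped 0 get_stopped cs none]
    have h := rpAux_map_snd pvStopped 0 cs
    show pvFirstIn pvStopped cs =
      (match minPair none (rpAux pvStopped 0 cs) with
       | none => none
       | some b => some b.2)
    rcases hp : rpAux pvStopped 0 cs with _ | p <;> rw [hp] at h <;>
      simpa [minPair] using h.symm
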